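-- pv_equiv track=rewrite | github.com/David-TMP/advent_of_code_2024 | day9/day9_part2.py | find_left_space_for_file
-- ===== SOURCE A (Python) =====
-- def find_left_space_for_file(blocks, file_start, file_length):
--     # Find a contiguous run of '.' to the left of file_start that can fit file_length
--     # Search from left to right for a run of '.' that ends < file_start and run length >= file_length
--     # We only consider runs that are entirely to the left: run_end < file_start
--     dot_runs = []
--     in_run = False
--     run_start = 0
--     # Identify all runs of '.' to the left of file_start
--     for i in range(file_start):
--         if blocks[i] == '.':
--             if not in_run:
--                 in_run = True
--                 run_start = i
--         else:
--             if in_run: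
--                 # run ends at i-1
--                 run_length = i - run_start
--                 dot_runs.append((run_start, run_length))
--                 in_run = False
--     # If ended in a run
--     if in_run:
--         run_length = file_start - run_start
--         dot_runs.append((run_start, run_length))
--
--     # Now find the first run that can hold file_length
--     for (s, l) in dot_runs:
--         if l >= file_length:
--             return s
--     return None
-- ===== SOURCE B (Python) =====
-- def find_left_space_for_file(blocks, file_start, file_length):
--     # One pass: track the start and running length of the current dot run and
--     # return as soon as the run can hold the file; no intermediate run list.
--     count = 0
--     run_start = 0
--     for i in range(file_start):
--         if blocks[i] == '.':
--             if count == 0: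
--                 run_start = i
--             count += 1
--             if count >= file_length:
--                 return run_start
--         else:
--             count = 0
--     return None
-- ===== Notes on version B (the rewrite author's own statement) =====
-- stated objective: simpler
-- what changed: Single streaming pass with a running dot-count and early return replaces A's two phases (build the full list of dot runs, then scan it for the first fitting run); no intermediate run list is constructed.
-- outside the precondition, e.g. on find_left_space_for_file(['x'], 2, 1): A raises IndexError, B raises IndexError
import Mathlib
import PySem

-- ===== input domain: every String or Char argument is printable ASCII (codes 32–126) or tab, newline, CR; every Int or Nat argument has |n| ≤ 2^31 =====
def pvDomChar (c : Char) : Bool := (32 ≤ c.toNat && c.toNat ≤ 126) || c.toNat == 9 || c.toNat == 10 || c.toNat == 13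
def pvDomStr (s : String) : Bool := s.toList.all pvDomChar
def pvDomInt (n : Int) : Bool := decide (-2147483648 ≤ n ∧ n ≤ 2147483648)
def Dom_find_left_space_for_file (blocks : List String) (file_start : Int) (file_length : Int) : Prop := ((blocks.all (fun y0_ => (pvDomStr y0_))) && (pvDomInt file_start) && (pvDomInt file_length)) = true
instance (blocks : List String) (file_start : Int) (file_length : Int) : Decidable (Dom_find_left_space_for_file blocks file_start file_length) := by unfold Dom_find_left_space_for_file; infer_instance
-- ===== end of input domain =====

-- B replaces A's two phases (build a list of all dot runs, then scan it) by one
-- streaming pass with a running count and early return; objective: simpler.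

-- ===== PORT A =====
-- state: (dot_runs, in_run, run_start)
def flsStepA (blocks : List String) (st : List (Int × Int) × Bool × Int) (i : Int) :
    List (Int × Int) × Bool × Int :=
  if PySem.List.pyGetD blocks i "" == "." then
    if !st.2.1 then (st.1, true, i) else st
  else
    if st.2.1 then (st.1 ++ [(st.2.2, i - st.2.2)], false, st.2.2) else st

def find_left_space_for_file (blocks : List String) (file_start : Int) (file_length : Int) : Option Int :=
  let st := (PySem.List.pyRange 0 file_start 1).foldl (flsStepA blocks) ([], false, 0)
  let dot_runs := if st.2.1 then st.1 ++ [(st.2.2, file_start - st.2.2)] else st.1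
  -- second loop: return the first run (s, l) with l ≥ file_length
  (dot_runs.find? (fun p => decide (file_length ≤ p.2))).map Prod.fst

-- ===== PORT B =====
-- the for-loop of Source B with early return, as recursion over the index list
def flsLoopB (blocks : List String) (fl : Int) : List Int → Int → Int → Option Int
  | [], _, _ => none
  | i :: rest, count, run_start =>
    if PySem.List.pyGetD blocks i "" == "." then
      let rs' := if count == 0 then i else run_start
      if fl ≤ count + 1 then some rs' else flsLoopB blocks fl rest (count + 1) rs'
    else flsLoopB blocks fl rest 0 run_start

def find_left_space_for_file_alt (blocks : List String) (file_start : Int) (file_length : Int) : Option Int :=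
  flsLoopB blocks file_length (PySem.List.pyRange 0 file_start 1) 0 0

-- ===== PRECONDITION & SPEC =====
-- Pre_ excludes exactly the inputs where Python A raises IndexError: blocks[i] with
-- file_start exceeding len(blocks).
def Pre_find_left_space_for_file (blocks : List String) (file_start : Int) (file_length : Int) : Prop :=
  file_start ≤ (blocks.length : Int)
instance (blocks : List String) (file_start : Int) (file_length : Int) : Decidable (Pre_find_left_space_for_file blocks file_start file_length) := by unfold Pre_find_left_space_for_file; infer_instance

def pvWitness_find_left_space_for_file : List String × Int × Int := ([".", "1", ".", "."], 4, 2)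

def Spec_find_left_space_for_file (blocks : List String) (file_start : Int) (file_length : Int) (out : Option Int) : Prop := out = find_left_space_for_file_alt blocks file_start file_length
instance (blocks : List String) (file_start : Int) (file_length : Int) (out : Option Int) : Decidable (Spec_find_left_space_for_file blocks file_start file_length out) := by unfold Spec_find_left_space_for_file; infer_instance

-- ===== CLAIM (what is proved, stated in full; the proofs are below) =====
def Claim_equal_find_left_space_for_file : Prop := ∀ (blocks : List String) (file_start : Int) (file_length : Int), Dom_find_left_space_for_file blocks file_start file_length → Pre_find_left_space_for_file blocks file_start file_length → Spec_find_left_space_for_file blocks file_start file_length (find_left_space_for_file blocks file_start file_length)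

-- ===== LEMMAS AND PROOFS =====

-- A's "finish": close the pending run and scan the run list for the first fit
def flsFinish (fs fl : Int) (st : List (Int × Int) × Bool × Int) : Option Int :=
  ((if st.2.1 then st.1 ++ [(st.2.2, fs - st.2.2)] else st.1).find?
      (fun p => decide (fl ≤ p.2))).map Prod.fst

theorem flsFinish_def (blocks : List String) (fs fl : Int) :
    find_left_space_for_file blocks fs fl =
      flsFinish fs fl ((PySem.List.pyRange 0 fs 1).foldl (flsStepA blocks) ([], false, 0)) := rfl

-- step equations for A's loop body
theorem stepA_dot_in (blocks : List String) (runs : List (Int × Int)) (rs i : Int)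
    (h : (PySem.List.pyGetD blocks i "" == ".") = true) :
    flsStepA blocks (runs, true, rs) i = (runs, true, rs) := by simp [flsStepA, h]

theorem stepA_dot_out (blocks : List String) (runs : List (Int × Int)) (rs i : Int)
    (h : (PySem.List.pyGetD blocks i "" == ".") = true) :
    flsStepA blocks (runs, false, rs) i = (runs, true, i) := by simp [flsStepA, h]

theorem stepA_nondot_in (blocks : List String) (runs : List (Int × Int)) (rs i : Int)
    (h : (PySem.List.pyGetD blocks i "" == ".") = false) :
    flsStepA blocks (runs, true, rs) i = (runs ++ [(rs, i - rs)], false, rs) := by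
  simp [flsStepA, h]

theorem stepA_nondot_out (blocks : List String) (runs : List (Int × Int)) (rs i : Int)
    (h : (PySem.List.pyGetD blocks i "" == ".") = false) :
    flsStepA blocks (runs, false, rs) i = (runs, false, rs) := by simp [flsStepA, h]

-- each step only appends to the run list
theorem flsStepA_fst (blocks : List String) (st : List (Int × Int) × Bool × Int) (i : Int) :
    ∃ ex0, (flsStepA blocks st i).1 = st.1 ++ ex0 := by
  unfold flsStepA
  split
  · split
    · exact ⟨[], by simp⟩
    · exact ⟨[], by simp⟩
  · split
    · exact ⟨[(st.2.2, i - st.2.2)], rfl⟩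
    · exact ⟨[], by simp⟩

-- so the whole fold only appends to the run list
theorem flsFold_prefix (blocks : List String) :
    ∀ (l : List Int) (st : List (Int × Int) × Bool × Int),
      ∃ ex, (l.foldl (flsStepA blocks) st).1 = st.1 ++ ex := by
  intro l
  induction l with
  | nil => intro st; exact ⟨[], by simp⟩
  | cons i rest ih =>
    intro st
    obtain ⟨ex0, h0⟩ := flsStepA_fst blocks st i
    obtain ⟨ex, hex⟩ := ih (flsStepA blocks st i)
    exact ⟨ex0 ++ ex, by simp [List.foldl_cons, hex, h0]⟩

-- once a fitting run is already recorded, the final answer is its start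
theorem flsFinish_of_found (blocks : List String) (fs fl : Int)
    (l : List Int) (st : List (Int × Int) × Bool × Int) (p : Int × Int)
    (hfind : st.1.find? (fun p => decide (fl ≤ p.2)) = some p) :
    flsFinish fs fl (l.foldl (flsStepA blocks) st) = some p.1 := by
  obtain ⟨ex, hex⟩ := flsFold_prefix blocks l st
  unfold flsFinish
  split
  · rw [hex]; simp [List.find?_append, hfind]
  · rw [hex]; simp [List.find?_append, hfind]

-- currently inside a run that already fits → A's final answer is its start
theorem flsA_inrun_done (blocks : List String) (fs fl : Int) :
    ∀ (n : Nat) (j s : Int) (runs : List (Int × Int)),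
      (fs - j).toNat = n → j ≤ fs → fl ≤ j - s →
      (runs.find? (fun p => decide (fl ≤ p.2)) = none) →
      flsFinish fs fl ((PySem.List.pyRange j fs 1).foldl (flsStepA blocks) (runs, true, s))
        = some s := by
  intro n
  induction n with
  | zero =>
    intro j s runs hn hj hfit hnone
    have hje : j = fs := by omega
    subst hje
    rw [PySem.List.pyRange_one_eq_nil (le_refl j)]
    simp only [List.foldl_nil]
    unfold flsFinish
    simp [List.find?_append, hnone, List.find?_cons, hfit]
  | succ n ih =>
    intro j s runs hn hj hfit hnone
    have hjf : j < fs := by omega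
    rw [PySem.List.pyRange_one_cons hjf]
    simp only [List.foldl_cons]
    by_cases hdot : (PySem.List.pyGetD blocks j "" == ".") = true
    · rw [stepA_dot_in blocks runs s j hdot]
      exact ih (j + 1) s runs (by omega) (by omega) (by omega) hnone
    · rw [stepA_nondot_in blocks runs s j (by simpa using hdot)]
      have hfound : ((runs ++ [(s, j - s)]).find? (fun p => decide (fl ≤ p.2)))
          = some (s, j - s) := by
        simp [List.find?_append, hnone, List.find?_cons, hfit]
      exact flsFinish_of_found blocks fs fl (PySem.List.pyRange (j + 1) fs 1)
        (runs ++ [(s, j - s)], false, s) (s, j - s) hfound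

-- main invariant: A's finish of the fold equals B's early-return scan
theorem fls_main (blocks : List String) (fs fl : Int) :
    ∀ (n : Nat) (j : Int) (runs : List (Int × Int)) (inr : Bool) (rsA cnt rsB : Int),
      (fs - j).toNat = n →
      (runs.find? (fun p => decide (fl ≤ p.2)) = none) →
      (inr = true → rsA = rsB ∧ cnt = j - rsA ∧ cnt < fl ∧ 1 ≤ cnt) →
      (inr = false → cnt = 0) →
      flsFinish fs fl ((PySem.List.pyRange j fs 1).foldl (flsStepA blocks) (runs, inr, rsA))
        = flsLoopB blocks fl (PySem.List.pyRange j fs 1) cnt rsB := by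
  intro n
  induction n with
  | zero =>
    intro j runs inr rsA cnt rsB hn hnone hinvT hinvF
    rw [PySem.List.pyRange_one_eq_nil (by omega)]
    simp only [List.foldl_nil, flsLoopB]
    unfold flsFinish
    cases inr with
    | false => simp [hnone]
    | true =>
      obtain ⟨h1, h2, h3, h4⟩ := hinvT rfl
      have hfs : (decide (fl ≤ fs - rsA)) = false := by simp; omega
      simp [List.find?_append, hnone, hfs]
  | succ n ih =>
    intro j runs inr rsA cnt rsB hn hnone hinvT hinvF
    have hjf : j < fs := by omega
    rw [PySem.List.pyRange_one_cons hjf]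
    simp only [List.foldl_cons, flsLoopB]
    by_cases hdot : (PySem.List.pyGetD blocks j "" == ".") = true
    · rw [hdot]
      simp only [reduceIte]
      cases inr with
      | true =>
        obtain ⟨h1, h2, h3, h4⟩ := hinvT rfl
        rw [stepA_dot_in blocks runs rsA j hdot]
        have hc0 : (cnt == 0) = false := by rw [beq_eq_false_iff_ne]; omega
        rw [hc0]
        simp only [Bool.false_eq_true, ite_false]
        by_cases hret : fl ≤ cnt + 1
        · rw [if_pos hret, ← h1]
          exact flsA_inrun_done blocks fs fl ((fs - (j + 1)).toNat) (j + 1) rsA runs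
            rfl (by omega) (by omega) hnone
        · rw [if_neg hret, ← h1]
          exact ih (j + 1) runs true rsA (cnt + 1) rsA (by omega) hnone
            (fun _ => by omega) (fun h => by cases h)
      | false =>
        have hc : cnt = 0 := hinvF rfl
        rw [stepA_dot_out blocks runs rsA j hdot]
        have hc0 : (cnt == 0) = true := by rw [beq_iff_eq]; omega
        rw [hc0]
        simp only [ite_true]
        by_cases hret : fl ≤ cnt + 1
        · rw [if_pos hret]
          exact flsA_inrun_done blocks fs fl ((fs - (j + 1)).toNat) (j + 1) j runs
            rfl (by omega) (by omega) hnone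
        · rw [if_neg hret]
          exact ih (j + 1) runs true j (cnt + 1) j (by omega) hnone
            (fun _ => by omega) (fun h => by cases h)
    · have hdot' : (PySem.List.pyGetD blocks j "" == ".") = false := by simpa using hdot
      rw [hdot']
      simp only [Bool.false_eq_true, ite_false]
      cases inr with
      | true =>
        obtain ⟨h1, h2, h3, h4⟩ := hinvT rfl
        rw [stepA_nondot_in blocks runs rsA j hdot']
        have hnone' : ((runs ++ [(rsA, j - rsA)]).find? (fun p => decide (fl ≤ p.2)))
            = none := by
          have hx : (decide (fl ≤ j - rsA)) = false := by simp; omega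
          simp [List.find?_append, hnone, hx]
        exact ih (j + 1) (runs ++ [(rsA, j - rsA)]) false rsA 0 rsB (by omega) hnone'
          (fun h => by cases h) (fun _ => rfl)
      | false =>
        have hc : cnt = 0 := hinvF rfl
        rw [stepA_nondot_out blocks runs rsA j hdot']
        subst hc
        exact ih (j + 1) runs false rsA 0 rsB (by omega) hnone
          (fun h => by cases h) (fun _ => rfl)

-- ===== VERDICT (by name: the statement is the Claim_ definition above) =====
theorem find_left_space_for_file_spec : Claim_equal_find_left_space_for_file := by
  intro blocks fs fl _ _
  unfold Spec_find_left_space_for_file find_left_space_for_file_alt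
  rw [flsFinish_def]
  exact fls_main blocks fs fl (fs - 0).toNat 0 [] false 0 0 0 rfl rfl (fun h => by cases h) (fun _ => rfl)
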